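-- pv_equiv track=rewrite | github.com/KotisKotlyandii/lessons1 | ege22/62.py | f
-- ===== SOURCE A (Python) =====
-- def f(x):
--     a,b = 0,0
--     while x > 0:
--         y = x % 10
--         if y > 3: a += 1
--         if y < 8: b += 1
--         x //= 10
--     return '%d\n%d' % (a,b)
-- ===== SOURCE B (Python) =====
-- def f(x):
--     if x <= 0:
--         return '0\n0'
--     s = str(x)
--     a = sum(1 for c in s if c > '3')
--     b = sum(1 for c in s if c < '8')
--     return '%d\n%d' % (a, b)
-- ===== Notes on version B (the rewrite author's own statement) =====
-- stated objective: simpler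
-- what changed: Replaces the single arithmetic digit-extraction while-loop that accumulates both counts at once with a guard for x<=0 plus two independent comprehension passes over the decimal string of x, comparing characters directly.
import Mathlib
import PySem

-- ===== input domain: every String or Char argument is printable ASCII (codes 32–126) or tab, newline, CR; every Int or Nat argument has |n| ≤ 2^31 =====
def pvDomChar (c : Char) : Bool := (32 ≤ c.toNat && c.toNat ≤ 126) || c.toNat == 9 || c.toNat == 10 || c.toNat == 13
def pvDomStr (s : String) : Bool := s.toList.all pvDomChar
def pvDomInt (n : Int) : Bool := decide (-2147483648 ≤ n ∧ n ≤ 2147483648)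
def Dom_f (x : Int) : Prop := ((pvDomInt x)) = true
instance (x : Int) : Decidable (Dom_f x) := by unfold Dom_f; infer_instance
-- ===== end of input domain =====

-- B replaces A's single while-loop accumulating both digit counts arithmetically with a
-- guard for x ≤ 0 plus two independent character-comparison passes over str(x) (simpler).

-- ===== PORT A =====
-- while x > 0: y = x % 10; if y > 3: a += 1; if y < 8: b += 1; x //= 10
def fLoop (x a b : Int) : Int × Int :=
  if h : x > 0 then
    let y := PySem.Int.mod x 10
    fLoop (PySem.Int.floordiv x 10) (if y > 3 then a + 1 else a) (if y < 8 then b + 1 else b)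
  else (a, b)
termination_by x.toNat
decreasing_by
  rw [PySem.Int.floordiv_eq_ediv_of_pos (by norm_num)]
  omega

-- '%d\n%d' % (a, b)
def fFmt (a b : Int) : String :=
  String.ofList (PySem.Int.toChars a ++ '\n' :: PySem.Int.toChars b)

def f (x : Int) : String :=
  let r := fLoop x 0 0
  fFmt r.1 r.2

-- ===== PORT B =====
def f_alt (x : Int) : String :=
  if x ≤ 0 then "0\n0"
  else
    let s := PySem.Int.toChars x           -- str(x)
    let a := s.countP (fun c => decide ('3' < c))   -- sum(1 for c in s if c > '3')
    let b := s.countP (fun c => decide (c < '8'))   -- sum(1 for c in s if c < '8')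
    fFmt (a : Int) (b : Int)

-- ===== PRECONDITION & SPEC =====
def Spec_f (x : Int) (out : String) : Prop := out = f_alt x
instance (x : Int) (out : String) : Decidable (Spec_f x out) := by unfold Spec_f; infer_instance

-- ===== CLAIM (what is proved, stated in full; the proofs are below) =====
def Claim_equal_f : Prop := ∀ (x : Int), Dom_f x → Spec_f x (f x)

-- ===== LEMMAS AND PROOFS =====

lemma toDigitsCore_acc (b f : Nat) :
    ∀ (n : Nat) (acc : List Char),
      Nat.toDigitsCore b f n acc = Nat.toDigitsCore b f n [] ++ acc := by
  induction f with
  | zero => intro n acc; simp [Nat.toDigitsCore]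
  | succ f ih =>
    intro n acc
    simp only [Nat.toDigitsCore]
    split_ifs with h
    · rfl
    · rw [ih (n / b) ((n % b).digitChar :: acc), ih (n / b) [(n % b).digitChar]]
      simp

lemma toDigitsCore_fuel (b : Nat) (hb : 2 ≤ b) :
    ∀ (n : Nat), ∀ (f : Nat) (acc : List Char), n < f →
      Nat.toDigitsCore b f n acc = Nat.toDigitsCore b (n + 1) n acc := by
  intro n
  induction n using Nat.strong_induction_on with
  | _ n ih =>
    intro f acc hf
    match f, hf with
    | f + 1, hf =>
      simp only [Nat.toDigitsCore]
      split_ifs with h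
      · rfl
      · have hn0 : 0 < n := by
          rcases Nat.eq_zero_or_pos n with rfl | h0
          · exact absurd (by simp) h
          · exact h0
        have hq : n / b < n := Nat.div_lt_self hn0 hb
        rw [ih (n / b) hq f _ (lt_of_lt_of_le hq (by omega)), ih (n / b) hq n _ hq]

lemma toDigits_small (n : Nat) (h : n < 10) : Nat.toDigits 10 n = [Nat.digitChar n] := by
  simp only [Nat.toDigits, Nat.toDigitsCore]
  rw [if_pos (Nat.div_eq_of_lt h), Nat.mod_eq_of_lt h]

lemma toDigits_step (n : Nat) (h : 0 < n / 10) :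
    Nat.toDigits 10 n = Nat.toDigits 10 (n / 10) ++ [Nat.digitChar (n % 10)] := by
  have hn : 0 < n := by
    rcases Nat.eq_zero_or_pos n with h0 | h0
    · simp [h0] at h
    · exact h0
  have hq : n / 10 < n := Nat.div_lt_self hn (by norm_num)
  conv_lhs => simp only [Nat.toDigits, Nat.toDigitsCore]
  rw [if_neg (by omega), toDigitsCore_acc,
    toDigitsCore_fuel 10 (by norm_num) (n / 10) n [] hq]
  rfl

lemma digitChar_gt3 (m : Nat) (h : m < 10) : ('3' < Nat.digitChar m) ↔ 3 < m := by
  interval_cases m <;> decide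

lemma digitChar_lt8 (m : Nat) (h : m < 10) : (Nat.digitChar m < '8') ↔ m < 8 := by
  interval_cases m <;> decide

lemma fLoop_eq (n : Nat) (hn : 0 < n) : ∀ (a b : Int),
    fLoop (n : Int) a b =
      (a + ((Nat.toDigits 10 n).countP (fun c => decide ('3' < c)) : Int),
       b + ((Nat.toDigits 10 n).countP (fun c => decide (c < '8')) : Int)) := by
  induction n using Nat.strong_induction_on with
  | _ n ih =>
    intro a b
    rw [fLoop, dif_pos (by exact_mod_cast hn)]
    rw [PySem.Int.mod_eq_emod_of_pos (by norm_num),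
      PySem.Int.floordiv_eq_ediv_of_pos (by norm_num)]
    have hmod : (n : Int) % 10 = ((n % 10 : Nat) : Int) := by omega
    have hdiv : (n : Int) / 10 = ((n / 10 : Nat) : Int) := by omega
    have hm : n % 10 < 10 := Nat.mod_lt n (by norm_num)
    rw [hmod, hdiv]
    by_cases h10 : n / 10 = 0
    · have hlt : n < 10 := by omega
      rw [h10]
      rw [fLoop, dif_neg (by norm_num)]
      rw [toDigits_small n hlt, Nat.mod_eq_of_lt hlt] at *
      simp only [List.countP_cons, List.countP_nil]
      by_cases h3 : 3 < n <;> by_cases h8 : n < 8 <;>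
        simp [h3, h8, digitChar_gt3 n hlt, digitChar_lt8 n hlt,
          show ((n : Int) > 3) ↔ 3 < n from by omega,
          show ((n : Int) < 8) ↔ n < 8 from by omega]
    · have hq : n / 10 < n := Nat.div_lt_self (by omega) (by norm_num)
      rw [ih (n / 10) hq (by omega)]
      rw [toDigits_step n (by omega)]
      simp only [List.countP_append, List.countP_cons, List.countP_nil]
      by_cases h3 : 3 < n % 10 <;> by_cases h8 : n % 10 < 8 <;>
        simp [h3, h8, digitChar_gt3 _ hm, digitChar_lt8 _ hm] <;>
        omega

-- ===== VERDICT (by name: the statement is the Claim_ definition above) =====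
theorem f_spec : Claim_equal_f := by
  unfold Claim_equal_f
  intro x _
  unfold Spec_f f f_alt
  by_cases hx : x ≤ 0
  · rw [if_pos hx]
    rw [show fLoop x 0 0 = (0, 0) from by rw [fLoop, dif_neg (by omega)]]
    decide
  · rw [if_neg hx]
    have hpos : 0 < x.toNat := by omega
    have hx' : x = ((x.toNat : Nat) : Int) := by omega
    rw [hx', fLoop_eq x.toNat hpos 0 0]
    have hch : PySem.Int.toChars ((x.toNat : Nat) : Int) = Nat.toDigits 10 x.toNat := by
      unfold PySem.Int.toChars
      rw [if_neg (by omega)]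
      congr 1
    rw [hch]
    simp
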